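-- pv_equiv track=rewrite | github.com/ymu0117/programming | cipher/utils.py | create_pattern_map
-- ===== SOURCE A (Python) =====
-- def verify_case(word, case_type):
--     if case_type == 'insensitive':
--         return word.lower()
--     elif case_type == 'sensitive':
--         return word
--     else:
--         raise ValueError('Case type is not defined.')
--
-- def word2pattern(word, case_type):
--     """Convert word to pattern.
--     For example, for word 'abandon', the pattern will
--     be '0.1.0.2.3.4.2'
--     Parameters
--     ----------
--     word: str
--     """
--     word = verify_case(word, case_type)
--     pattern = []
--     int_map = {}
--     i = 0
--     for w in word:
--         if w not in int_map:
--             int_map[w] = str(i)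
--             i += 1
--         pattern.append(int_map[w])
--     return '.'.join(pattern)
--
-- def create_pattern_map(dictionary, case_type):
--     """Map words in the defined dictionary to patterns.
--     """
--     pattern_map = {}
--     for k in dictionary.keys():
--         pattern = word2pattern(k, case_type)
--         if pattern not in pattern_map:
--             pattern_map[pattern] = []
--         pattern_map[pattern].append(k)
--     return pattern_map
-- ===== SOURCE B (Python) =====
-- def verify_case(word, case_type):
--     if case_type == 'insensitive':
--         return word.lower()
--     elif case_type == 'sensitive':
--         return word
--     else:
--         raise ValueError('Case type is not defined.')
--
-- def word2pattern(word, case_type):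
--     word = verify_case(word, case_type)
--     pattern = []
--     int_map = {}
--     i = 0
--     for w in word:
--         if w not in int_map:
--             int_map[w] = str(i)
--             i += 1
--         pattern.append(int_map[w])
--     return '.'.join(pattern)
--
-- def create_pattern_map(dictionary, case_type):
--     """Map words in the defined dictionary to patterns."""
--     pairs = [(word2pattern(k, case_type), k) for k in dictionary.keys()]
--     order = list(dict.fromkeys(p for p, _ in pairs))
--     return {p: [k for q, k in pairs if q == p] for p in order}
-- ===== Notes on version B (the rewrite author's own statement) =====
-- stated objective: alternative
-- what changed: create_pattern_map no longer grows a dict incrementally inside the key loop; it precomputes all (pattern, word) pairs, dedups the patterns in first-occurrence order, and builds each group by a filtering comprehension over the pair list.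
import Mathlib
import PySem

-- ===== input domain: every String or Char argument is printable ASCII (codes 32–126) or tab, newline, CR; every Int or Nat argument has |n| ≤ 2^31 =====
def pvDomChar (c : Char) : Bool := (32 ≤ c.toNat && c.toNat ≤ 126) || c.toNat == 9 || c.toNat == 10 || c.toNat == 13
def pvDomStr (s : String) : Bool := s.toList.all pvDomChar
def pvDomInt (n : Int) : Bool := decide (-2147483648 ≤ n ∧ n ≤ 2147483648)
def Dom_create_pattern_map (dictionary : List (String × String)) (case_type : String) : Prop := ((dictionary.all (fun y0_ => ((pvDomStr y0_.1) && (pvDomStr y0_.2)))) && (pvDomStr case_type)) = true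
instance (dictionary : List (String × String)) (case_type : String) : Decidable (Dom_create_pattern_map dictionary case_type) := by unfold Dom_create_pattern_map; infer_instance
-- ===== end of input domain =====

-- B replaces A's incremental dict-grouping loop with: precompute (pattern, word) pairs,
-- dedup the patterns in first-occurrence order, then build each group by filtering the
-- pair list (objective: alternative decomposition, similar cost).


-- ===== PORT A =====
-- verify_case: returns none exactly where the Python raises ValueError
def verify_case (word : String) (case_type : String) : Option String :=
  if case_type = "insensitive" then some (PySem.Str.lower word)
  else if case_type = "sensitive" then some word
  else none

-- word2pattern: loop state (pattern, int_map, i); int_map[w] read back with getD ""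
-- (exact: the key is always present at that point, so no KeyError is possible)
def word2pattern (word : String) (case_type : String) : Option String :=
  (verify_case word case_type).map (fun w =>
    let st := w.toList.foldl
      (fun (st : List String × PySem.Dict Char String × Int) c =>
        let (pattern, int_map, i) := st
        let (int_map, i) :=
          if int_map.contains c then (int_map, i)
          else (int_map.insert c (PySem.Int.toStr i), i + 1)
        (pattern ++ [int_map.getD c ""], int_map, i))
      ([], PySem.Dict.empty, 0)
    PySem.Str.join "." st.1)

-- the pattern used for key k; under Pre_ word2pattern always returns some
-- (outside Pre_ the Python raises; the default "" is never claimed about)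
def patternOf (k : String) (case_type : String) : String :=
  (word2pattern k case_type).getD ""

def create_pattern_map (dictionary : List (String × String)) (case_type : String) : List (String × List String) :=
  ((PySem.Dict.ofList dictionary).keys.foldl
    (fun (pattern_map : PySem.Dict String (List String)) k =>
      let pattern := patternOf k case_type
      let pattern_map := if pattern_map.contains pattern then pattern_map
                         else pattern_map.insert pattern []
      pattern_map.modify pattern [] (· ++ [k]))
    PySem.Dict.empty).items

-- ===== PORT B =====
def create_pattern_map_alt (dictionary : List (String × String)) (case_type : String) : List (String × List String) :=
  let pairs := (PySem.Dict.ofList dictionary).keys.map (fun k => (patternOf k case_type, k))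
  let order := PySem.List.dedup (pairs.map (·.1))
  order.map (fun p => (p, (pairs.filter (fun qk => qk.1 == p)).map (·.2)))

-- ===== PRECONDITION & SPEC =====
-- Pre_ excludes exactly the inputs where Python A raises ValueError: a non-empty
-- dictionary with a case_type other than 'insensitive'/'sensitive'.
def Pre_create_pattern_map (dictionary : List (String × String)) (case_type : String) : Prop :=
  dictionary = [] ∨ case_type = "insensitive" ∨ case_type = "sensitive"
instance (dictionary : List (String × String)) (case_type : String) : Decidable (Pre_create_pattern_map dictionary case_type) := by unfold Pre_create_pattern_map; infer_instance
def pvWitness_create_pattern_map : (List (String × String)) × String := ([("ab", "1"), ("ba", "2"), ("cc", "3")], "sensitive")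
def Spec_create_pattern_map (dictionary : List (String × String)) (case_type : String) (out : List (String × List String)) : Prop := out = create_pattern_map_alt dictionary case_type
instance (dictionary : List (String × String)) (case_type : String) (out : List (String × List String)) : Decidable (Spec_create_pattern_map dictionary case_type out) := by unfold Spec_create_pattern_map; infer_instance

-- ===== CLAIM (what is proved, stated in full; the proofs are below) =====
def Claim_equal_create_pattern_map : Prop := ∀ (dictionary : List (String × String)) (case_type : String), Dom_create_pattern_map dictionary case_type → Pre_create_pattern_map dictionary case_type → Spec_create_pattern_map dictionary case_type (create_pattern_map dictionary case_type)

-- ===== LEMMAS AND PROOFS =====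

-- A's "ensure key, then append" step equals a single modify-append.
lemma not_contains_keys {d : PySem.Dict String (List String)} {p : String}
    (h : d.contains p = false) : ∀ q ∈ d.items, (q.1 == p) = false := by
  intro q hq
  by_contra hc
  have heq : q.1 = p := beq_iff_eq.mp ((Bool.not_eq_false _).mp hc)
  have hp : p ∈ d.keys := by
    simp only [PySem.Dict.keys]
    exact List.mem_map.mpr ⟨q, hq, heq⟩
  exact absurd ((PySem.Dict.contains_iff_mem_keys d p).mpr hp) (by simp [h])

lemma step_eq_modify (d : PySem.Dict String (List String)) (p : String) (k : String) :
    (if d.contains p then d else d.insert p []).modify p [] (· ++ [k])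
      = d.modify p [] (· ++ [k]) := by
  by_cases h : d.contains p = true
  · simp [h]
  · have h' : d.contains p = false := by simpa using h
    simp only [h, Bool.false_eq_true, if_false]
    apply PySem.Dict.ext
    simp only [PySem.Dict.modify, PySem.Dict.getD_insert_self,
      PySem.Dict.getD_of_not_contains d _ h']
    rw [PySem.Dict.items_insert_of_contains _ _ (by simp [PySem.Dict.contains_insert_self]),
        PySem.Dict.items_insert_of_not_contains _ _ h',
        PySem.Dict.items_insert_of_not_contains _ _ h',
        List.map_append]
    congr 1
    · conv_rhs => rw [← List.map_id d.items]
      exact List.map_congr_left (fun q hq => by simp [not_contains_keys h' q hq])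
    · simp

lemma items_eq_map_keys (d : PySem.Dict String (List String)) (h : d.keys.Nodup) :
    d.items = d.keys.map (fun k => (k, d.getD k [])) := by
  simp only [PySem.Dict.keys, List.map_map]
  conv_lhs => rw [← List.map_id d.items]
  refine List.map_congr_left (fun q hq => ?_)
  have := PySem.Dict.getD_of_mem_items d (k := q.1) (v := q.2) (by simpa using hq) h []
  simp [Function.comp, this]


-- ===== VERDICT (by name: the statement is the Claim_ definition above) =====
theorem create_pattern_map_spec : Claim_equal_create_pattern_map := by
  intro dictionary case_type _ _
  unfold Spec_create_pattern_map create_pattern_map create_pattern_map_alt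
  set ks := (PySem.Dict.ofList dictionary).keys with hks
  set pairs := ks.map (fun k => (patternOf k case_type, k)) with hpairs
  have hfold :
      ks.foldl
        (fun (pattern_map : PySem.Dict String (List String)) k =>
          let pattern := patternOf k case_type
          let pattern_map := if pattern_map.contains pattern then pattern_map
                             else pattern_map.insert pattern []
          pattern_map.modify pattern [] (· ++ [k]))
        PySem.Dict.empty
      = pairs.foldl (fun d qk => d.modify qk.1 [] (· ++ [qk.2])) PySem.Dict.empty := by
    rw [hpairs, List.foldl_map]
    have hf : (fun (pattern_map : PySem.Dict String (List String)) k =>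
          let pattern := patternOf k case_type
          let pattern_map := if pattern_map.contains pattern then pattern_map
                             else pattern_map.insert pattern []
          pattern_map.modify pattern [] (· ++ [k]))
        = (fun (d : PySem.Dict String (List String)) k =>
            d.modify (patternOf k case_type) [] (· ++ [k])) := by
      funext d k
      exact step_eq_modify d (patternOf k case_type) k
    rw [hf]
  rw [hfold]
  have hnodup : (pairs.foldl (fun d qk => d.modify qk.1 [] (· ++ [qk.2])) PySem.Dict.empty).keys.Nodup :=
    PySem.Dict.nodup_keys_foldl_modify_key pairs Prod.fst [] (fun _ qk v => v ++ [qk.2]) PySem.Dict.empty (by simp)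
  rw [items_eq_map_keys _ hnodup]
  have hkeys : (pairs.foldl (fun d qk => d.modify qk.1 [] (· ++ [qk.2])) PySem.Dict.empty).keys
      = PySem.List.dedup (pairs.map (·.1)) := by
    rw [PySem.Dict.keys_foldl_modify_key pairs Prod.fst [] (fun _ qk v => v ++ [qk.2]) PySem.Dict.empty,
        PySem.List.dedup_eq_ofList, PySem.Set.ofList_eq_foldl]
    rfl
  rw [hkeys]
  refine List.map_congr_left (fun p _ => ?_)
  rw [PySem.Dict.getD_foldl_modify_append pairs PySem.Dict.empty p]
  simp [PySem.Dict.getD_empty]
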